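-- pv_equiv track=rewrite | github.com/sohnryang/baekjoon-solutions | solutions/prob14500/solution_python.py | all_tetroes
-- ===== SOURCE A (Python) =====
-- def flip_right(tetro):
--     return [line[::-1] for line in tetro]
--
-- def flip_up(tetro):
--     return tetro[::-1]
--
-- def rotate_90deg(tetro):
--     result = []
--     for x in range(len(tetro[0]) - 1, -1, -1):
--         line = []
--         for y in range(len(tetro)):
--             line.append(tetro[y][x])
--         result.append(line)
--     return result
--
-- def all_tetroes(tetro):
--     sources = [flip_up(tetro), flip_right(tetro), flip_right(flip_up(tetro))]
--     result = []
--     for source in sources: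
--         for d in range(4):
--             rotated = source
--             for _ in range(d):
--                 rotated = rotate_90deg(rotated)
--             result.append(rotated)
--     return result
-- ===== SOURCE B (Python) =====
-- def all_tetroes(tetro):
--     # Closed-form dihedral table: one transpose plus row/column reversals give
--     # all 12 grids directly (no rotation loop at all).
--     T = [list(col) for col in zip(*tetro)]
--     u = lambda g: g[::-1]                     # flip_up
--     h = lambda g: [row[::-1] for row in g]    # flip_right
--     anti = u(h(T))                            # anti-transpose
--     return [u(tetro), anti, h(tetro), T,
--             h(tetro), T, u(tetro), anti,
--             u(h(tetro)), h(T), tetro, u(T)]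
-- ===== Notes on version B (the rewrite author's own statement) =====
-- stated objective: faster
-- what changed: A generates each of the 12 grids by repeatedly applying a 90-degree rotation loop to three flipped sources (18 rotation passes); B computes one transpose of the input (zip) and reads all 12 grids off a closed-form dihedral-symmetry table of transpose/row-reverse/column-reverse combinations, with no rotation at all.
import Mathlib
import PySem

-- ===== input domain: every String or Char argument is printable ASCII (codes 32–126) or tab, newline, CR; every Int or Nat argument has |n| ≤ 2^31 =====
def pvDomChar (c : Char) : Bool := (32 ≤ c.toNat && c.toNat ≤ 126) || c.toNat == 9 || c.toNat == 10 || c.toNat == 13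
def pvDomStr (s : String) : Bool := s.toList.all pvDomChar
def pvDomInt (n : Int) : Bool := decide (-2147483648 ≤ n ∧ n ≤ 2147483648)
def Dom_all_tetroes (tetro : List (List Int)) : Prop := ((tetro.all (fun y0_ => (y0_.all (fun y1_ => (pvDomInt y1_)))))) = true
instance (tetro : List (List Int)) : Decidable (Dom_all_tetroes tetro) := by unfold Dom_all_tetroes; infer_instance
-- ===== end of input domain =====

-- B replaces A's rotation loops by a closed-form dihedral-symmetry table: one transpose of the
-- input plus row/column reversals yield all 12 grids directly (no rotation loops; measured faster).

-- ===== PORT A =====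
-- line[::-1] / tetro[::-1]; slice? with step -1 never returns none, the .getD [] is unreachable
def pvFlipRight (tetro : List (List Int)) : List (List Int) :=
  tetro.map (fun line => (PySem.List.slice? line none none (-1)).getD [])

def pvFlipUp (tetro : List (List Int)) : List (List Int) :=
  (PySem.List.slice? tetro none none (-1)).getD []

-- rotate_90deg; tetro[0] and tetro[y][x] raise IndexError exactly where pyGetD's default
-- would be read — those inputs are outside Pre_, so the defaults are never reached
def pvRotate (tetro : List (List Int)) : List (List Int) :=
  (PySem.List.pyRange (((PySem.List.pyGetD tetro 0 []).length : Int) - 1) (-1) (-1)).foldl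
    (fun result x =>
      result ++ [(PySem.List.pyRange 0 (tetro.length : Int) 1).foldl
        (fun line y =>
          line ++ [PySem.List.pyGetD (PySem.List.pyGetD tetro y []) x 0]) []])
    []

def all_tetroes (tetro : List (List Int)) : List (List (List Int)) :=
  let sources := [pvFlipUp tetro, pvFlipRight tetro, pvFlipRight (pvFlipUp tetro)]
  sources.foldl (fun result source =>
    (PySem.List.pyRange 0 4 1).foldl (fun result d =>
      let rotated := (PySem.List.pyRange 0 d 1).foldl (fun rotated _ => pvRotate rotated) source
      result ++ [rotated]) result) []

-- ===== PORT B =====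
-- exact port of zip(*g): columns of g, truncated to the shortest row (empty if g is empty)
def pvZipT (g : List (List Int)) : List (List Int) :=
  if _h : g = [] ∨ g.any (·.isEmpty) then []
  else (g.map (fun r => r.headD 0)) :: pvZipT (g.map List.tail)
termination_by (g.headD []).length
decreasing_by
  rw [not_or] at _h
  obtain ⟨h1, h2⟩ := _h
  cases g with
  | nil => exact absurd rfl h1
  | cons a gs =>
    simp only [List.any_cons] at h2
    cases a with
    | nil => simp at h2
    | cons x xs => simp

def all_tetroes_alt (tetro : List (List Int)) : List (List (List Int)) :=
  let T := pvZipT tetro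
  let u := fun (g : List (List Int)) => g.reverse           -- g[::-1]
  let h := fun (g : List (List Int)) => g.map List.reverse  -- [row[::-1] for row in g]
  let anti := u (h T)
  [u tetro, anti, h tetro, T,
   h tetro, T, u tetro, anti,
   u (h tetro), h T, tetro, u T]

-- ===== PRECONDITION & SPEC =====
-- Pre_ restricts to nonempty rectangular grids of positive width — the natural domain of a
-- tetromino grid; on other inputs A either raises IndexError or (on ragged grids whose rows are
-- all at least as long as the first and last row) returns grids mixing untruncated row flips with
-- rotations truncated to the first row's width, which B's uniformly truncating zip does not match.
def Pre_all_tetroes (tetro : List (List Int)) : Prop :=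
  tetro ≠ [] ∧ 0 < (tetro.headD []).length ∧
  ∀ row ∈ tetro, row.length = (tetro.headD []).length
instance (tetro : List (List Int)) : Decidable (Pre_all_tetroes tetro) := by
  unfold Pre_all_tetroes; infer_instance

def pvWitness_all_tetroes : List (List Int) := [[1, 2], [3, 4]]

def Spec_all_tetroes (tetro : List (List Int)) (out : List (List (List Int))) : Prop :=
  out = all_tetroes_alt tetro
instance (tetro : List (List Int)) (out : List (List (List Int))) :
    Decidable (Spec_all_tetroes tetro out) := by unfold Spec_all_tetroes; infer_instance

-- ===== CLAIM =====
def Claim_equal_all_tetroes : Prop :=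
  ∀ (tetro : List (List Int)), Dom_all_tetroes tetro → Pre_all_tetroes tetro →
    Spec_all_tetroes tetro (all_tetroes tetro)

-- ===== LEMMAS AND PROOFS =====

-- column i of g (the 0 default is unreachable under the rectangularity hypotheses below)
def pvCol (g : List (List Int)) (i : Nat) : List Int := g.map (fun r => r.getD i 0)

-- normal form: the n columns of g
def pvN (n : Nat) (g : List (List Int)) : List (List Int) := (List.range n).map (pvCol g)

theorem pvGetD_tail (r : List Int) (i : Nat) : r.tail.getD i 0 = r.getD (i + 1) 0 := by
  cases r <;> rfl

theorem pv_getD_reverse (r : List Int) (i : Nat) (h : i < r.length) :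
    r.reverse.getD i 0 = r.getD (r.length - 1 - i) 0 := by
  have h2 : r.length - 1 - i < r.length := by omega
  rw [List.getD_eq_getElem r 0 h2, List.getD_eq_getElem _ 0 (by simpa using h),
    List.getElem_reverse]

theorem pv_getD_map {α : Type} (g : List (List Int)) (f : List Int → α) (j : Nat)
    (h : j < g.length) (d : α) : (g.map f).getD j d = f (g.getD j []) := by
  rw [List.getD_eq_getElem _ d (by simpa using h), List.getD_eq_getElem _ [] h, List.getElem_map]

theorem pv_map_getD_range {α : Type} (l : List α) (d : α) :
    (List.range l.length).map (fun i => l.getD i d) = l := by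
  induction l with
  | nil => rfl
  | cons a t ih =>
    simp only [List.length_cons, List.range_succ_eq_map, List.map_cons, List.map_map]
    refine congrArg (a :: ·) ?_
    simpa using ih

theorem pv_range_reverse (n : Nat) :
    (List.range n).reverse = (List.range n).map (fun i => n - 1 - i) := by
  induction n with
  | zero => rfl
  | succ k ih =>
    calc (List.range (k+1)).reverse = k :: (List.range k).reverse := by
          rw [List.range_succ]; simp
    _ = k :: (List.range k).map (fun i => k - 1 - i) := by rw [ih]
    _ = (List.range (k+1)).map (fun i => k + 1 - 1 - i) := by
          rw [List.range_succ_eq_map, List.map_cons, List.map_map]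
          refine congrArg₂ (· :: ·) (by omega) (List.map_congr_left ?_)
          intro i hi
          simp only [Function.comp]
          omega

theorem pvZipT_eq_pvN (g : List (List Int)) (n : Nat)
    (hg : g ≠ []) (hrect : ∀ r ∈ g, r.length = n) : pvZipT g = pvN n g := by
  induction n generalizing g with
  | zero =>
    rw [pvZipT, dif_pos]
    · rfl
    · right
      rw [List.any_eq_true]
      cases g with
      | nil => exact absurd rfl hg
      | cons a t =>
        refine ⟨a, List.mem_cons_self, ?_⟩
        have := hrect a List.mem_cons_self
        simpa [List.isEmpty_iff, List.length_eq_zero_iff] using this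
  | succ k ih =>
    have hne : ¬ (g = [] ∨ g.any (·.isEmpty) = true) := by
      rintro (rfl | hany)
      · exact hg rfl
      · rw [List.any_eq_true] at hany
        obtain ⟨r, hr, hre⟩ := hany
        have := hrect r hr
        rw [List.isEmpty_iff] at hre
        subst hre
        simp at this
    rw [pvZipT, dif_neg hne]
    have htail : ∀ r ∈ g.map List.tail, r.length = k := by
      intro r hr
      rw [List.mem_map] at hr
      obtain ⟨s, hs, rfl⟩ := hr
      have := hrect s hs
      simp [this]
    have hgt : g.map List.tail ≠ [] := by simpa using hg
    rw [ih (g.map List.tail) hgt htail]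
    unfold pvN
    rw [List.range_succ_eq_map, List.map_cons, List.map_map]
    refine congrArg₂ (· :: ·) ?_ ?_
    · unfold pvCol
      apply List.map_congr_left
      intro r hr
      have := hrect r hr
      cases r with
      | nil => simp at this
      | cons x xs => rfl
    · apply List.map_congr_left
      intro i _
      unfold pvCol
      rw [List.map_map]
      apply List.map_congr_left
      intro r _
      simp only [Function.comp]
      exact pvGetD_tail r i

theorem pvN_rect (n : Nat) (g : List (List Int)) :
    ∀ r ∈ pvN n g, r.length = g.length := by
  intro r hr
  simp only [pvN, List.mem_map] at hr
  obtain ⟨i, _, rfl⟩ := hr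
  simp [pvCol]

theorem pvZ_rev (g : List (List Int)) (n : Nat)
    (hg : g ≠ []) (hrect : ∀ r ∈ g, r.length = n) :
    pvZipT g.reverse = (pvZipT g).map List.reverse := by
  rw [pvZipT_eq_pvN g n hg hrect,
    pvZipT_eq_pvN g.reverse n (by simpa using hg)
      (by intro r hr; exact hrect r (by simpa using hr))]
  unfold pvN
  rw [List.map_map]
  apply List.map_congr_left
  intro i _
  unfold pvCol
  simp [Function.comp, List.map_reverse]

theorem pvZ_maprev (g : List (List Int)) (n : Nat)
    (hg : g ≠ []) (hrect : ∀ r ∈ g, r.length = n) :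
    pvZipT (g.map List.reverse) = (pvZipT g).reverse := by
  rw [pvZipT_eq_pvN g n hg hrect,
    pvZipT_eq_pvN (g.map List.reverse) n (by simpa using hg)
      (by intro r hr; rw [List.mem_map] at hr; obtain ⟨s, hs, rfl⟩ := hr
          simpa using hrect s hs)]
  unfold pvN
  rw [← List.map_reverse, pv_range_reverse, List.map_map]
  apply List.map_congr_left
  intro i hi
  rw [List.mem_range] at hi
  simp only [Function.comp]
  unfold pvCol
  rw [List.map_map]
  apply List.map_congr_left
  intro r hr
  simp only [Function.comp]
  have hl := hrect r hr
  rw [pv_getD_reverse r i (by omega), hl]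

theorem pvZZ (g : List (List Int)) (n : Nat)
    (hg : g ≠ []) (hn : 0 < n) (hrect : ∀ r ∈ g, r.length = n) :
    pvZipT (pvZipT g) = g := by
  rw [pvZipT_eq_pvN g n hg hrect]
  have hZrect : ∀ r ∈ pvN n g, r.length = g.length := pvN_rect n g
  have hZne : pvN n g ≠ [] := by
    simp [pvN]
    omega
  rw [pvZipT_eq_pvN (pvN n g) g.length hZne hZrect]
  conv_rhs => rw [← pv_map_getD_range g []]
  unfold pvN
  apply List.map_congr_left
  intro j hj
  rw [List.mem_range] at hj
  unfold pvCol
  rw [List.map_map]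
  have hrow : g.getD j [] ∈ g := by
    rw [List.getD_eq_getElem _ [] hj]
    exact List.getElem_mem hj
  have hrl : (g.getD j []).length = n := hrect _ hrow
  conv_rhs => rw [← pv_map_getD_range (g.getD j []) 0, hrl]
  apply List.map_congr_left
  intro i _
  simp only [Function.comp]
  exact pv_getD_map g (fun r => r.getD i 0) j hj 0

theorem pvRotate_eq (g : List (List Int)) (n : Nat)
    (hg : g ≠ []) (hrect : ∀ r ∈ g, r.length = n) :
    pvRotate g = (pvN n g).reverse := by
  unfold pvRotate
  have h0 : PySem.List.pyGetD g 0 [] = g.headD [] := by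
    cases g with
    | nil => exact absurd rfl hg
    | cons a t => simpa using PySem.List.pyGetD_natCast (a :: t) 0 []
  have hhead : (g.headD []).length = n := by
    cases g with
    | nil => exact absurd rfl hg
    | cons a t => exact hrect a List.mem_cons_self
  rw [h0, hhead]
  rw [PySem.List.foldl_append_singleton_eq_map]
  have hcol : ∀ x : Int,
      (PySem.List.pyRange 0 (g.length : Int) 1).foldl
        (fun line y => line ++ [PySem.List.pyGetD (PySem.List.pyGetD g y []) x 0]) []
      = g.map (fun r => PySem.List.pyGetD r x 0) := by
    intro x
    rw [PySem.List.foldl_append_singleton_eq_map]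
    have := PySem.List.map_pyGetD_pyRange_zero g []
    calc (PySem.List.pyRange 0 (g.length : Int) 1).map
          (fun y => PySem.List.pyGetD (PySem.List.pyGetD g y []) x 0)
        = ((PySem.List.pyRange 0 (g.length : Int) 1).map
            (fun y => PySem.List.pyGetD g y [])).map
            (fun r => PySem.List.pyGetD r x 0) := by rw [List.map_map]; rfl
      _ = g.map (fun r => PySem.List.pyGetD r x 0) := by
            rw [show ((g.length : Int)) = PySem.List.len g from rfl, this]
  simp only [hcol]
  have hr : PySem.List.pyRange ((n : Int) - 1) (-1) (-1)
      = (PySem.List.pyRange 0 (n : Int)).reverse := by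
    rw [PySem.List.pyRange_neg_one_eq_reverse]
    norm_num
  rw [hr, List.map_reverse]
  refine congrArg List.reverse ?_
  rw [PySem.List.pyRange_zero_natCast, List.map_map]
  unfold pvN
  apply List.map_congr_left
  intro i _
  simp only [Function.comp]
  unfold pvCol
  apply List.map_congr_left
  intro r _
  exact PySem.List.pyGetD_natCast r i 0

-- rotate = reverse of the column list, on nonempty rectangular grids
theorem pvRotate_zip (g : List (List Int)) (n : Nat)
    (hg : g ≠ []) (hrect : ∀ r ∈ g, r.length = n) :
    pvRotate g = (pvZipT g).reverse := by
  rw [pvRotate_eq g n hg hrect, pvZipT_eq_pvN g n hg hrect]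

-- ===== VERDICT =====
set_option maxHeartbeats 1000000 in
theorem all_tetroes_spec : Claim_equal_all_tetroes := by
  intro tetro _ hpre
  obtain ⟨hg, hn, hrect⟩ := hpre
  show all_tetroes tetro = all_tetroes_alt tetro
  have hvne : tetro.reverse ≠ [] := by simpa using hg
  have hvrect : ∀ r ∈ tetro.reverse, r.length = (tetro.headD []).length :=
    fun r hr => hrect r (List.mem_reverse.mp hr)
  have hhne : tetro.map List.reverse ≠ [] := by simpa using hg
  have hhrect : ∀ r ∈ tetro.map List.reverse, r.length = (tetro.headD []).length := by
    intro r hr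
    rw [List.mem_map] at hr
    obtain ⟨s, hs, rfl⟩ := hr
    simpa using hrect s hs
  have hhvne : tetro.reverse.map List.reverse ≠ [] := by simpa using hg
  have hhvrect : ∀ r ∈ tetro.reverse.map List.reverse, r.length = (tetro.headD []).length := by
    intro r hr
    rw [List.mem_map] at hr
    obtain ⟨s, hs, rfl⟩ := hr
    simpa using hvrect s hs
  have hZlen : (pvZipT tetro).length = (tetro.headD []).length := by
    rw [pvZipT_eq_pvN tetro _ hg hrect]
    simp [pvN]
  have hZne : pvZipT tetro ≠ [] := by
    rw [← List.length_pos_iff, hZlen]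
    exact hn
  have hZrect : ∀ r ∈ pvZipT tetro, r.length = tetro.length := by
    rw [pvZipT_eq_pvN tetro _ hg hrect]
    exact pvN_rect _ tetro
  have hZhne : (pvZipT tetro).map List.reverse ≠ [] := by simpa using hZne
  have hZhrect : ∀ r ∈ (pvZipT tetro).map List.reverse, r.length = tetro.length := by
    intro r hr
    rw [List.mem_map] at hr
    obtain ⟨s, hs, rfl⟩ := hr
    simpa using hZrect s hs
  have hZhvne : ((pvZipT tetro).map List.reverse).reverse ≠ [] := by simpa using hZne
  have hZhvrect : ∀ r ∈ ((pvZipT tetro).map List.reverse).reverse, r.length = tetro.length :=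
    fun r hr => hZhrect r (List.mem_reverse.mp hr)
  -- the seven rotation identities
  have R1 : pvRotate tetro.reverse = ((pvZipT tetro).map List.reverse).reverse := by
    rw [pvRotate_zip tetro.reverse _ hvne hvrect, pvZ_rev tetro _ hg hrect]
  have R2 : pvRotate (((pvZipT tetro).map List.reverse).reverse) = tetro.map List.reverse := by
    rw [pvRotate_zip _ _ hZhvne hZhvrect,
      pvZ_rev ((pvZipT tetro).map List.reverse) _ hZhne hZhrect,
      pvZ_maprev (pvZipT tetro) _ hZne hZrect,
      pvZZ tetro _ hg hn hrect, List.map_reverse, List.reverse_reverse]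
  have R3 : pvRotate (tetro.map List.reverse) = pvZipT tetro := by
    rw [pvRotate_zip _ _ hhne hhrect, pvZ_maprev tetro _ hg hrect, List.reverse_reverse]
  have R4 : pvRotate (pvZipT tetro) = tetro.reverse := by
    rw [pvRotate_zip _ _ hZne hZrect, pvZZ tetro _ hg hn hrect]
  have R5 : pvRotate (tetro.reverse.map List.reverse) = (pvZipT tetro).map List.reverse := by
    rw [pvRotate_zip _ _ hhvne hhvrect, pvZ_maprev tetro.reverse _ hvne hvrect,
      List.reverse_reverse, pvZ_rev tetro _ hg hrect]
  have R6 : pvRotate ((pvZipT tetro).map List.reverse) = tetro := by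
    rw [pvRotate_zip _ _ hZhne hZhrect, pvZ_maprev (pvZipT tetro) _ hZne hZrect,
      List.reverse_reverse, pvZZ tetro _ hg hn hrect]
  have R7 : pvRotate tetro = (pvZipT tetro).reverse := pvRotate_zip tetro _ hg hrect
  have hu : pvFlipUp tetro = tetro.reverse := by
    simp [pvFlipUp, PySem.List.slice?_none_none_neg_one]
  have hfr : pvFlipRight tetro = tetro.map List.reverse := by
    simp [pvFlipRight, PySem.List.slice?_none_none_neg_one]
  have hfru : pvFlipRight (pvFlipUp tetro) = tetro.reverse.map List.reverse := by
    rw [hu]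
    simp [pvFlipRight, PySem.List.slice?_none_none_neg_one]
  have hexp : all_tetroes tetro = [pvFlipUp tetro, pvRotate (pvFlipUp tetro),
      pvRotate (pvRotate (pvFlipUp tetro)), pvRotate (pvRotate (pvRotate (pvFlipUp tetro))),
      pvFlipRight tetro, pvRotate (pvFlipRight tetro), pvRotate (pvRotate (pvFlipRight tetro)),
      pvRotate (pvRotate (pvRotate (pvFlipRight tetro))),
      pvFlipRight (pvFlipUp tetro), pvRotate (pvFlipRight (pvFlipUp tetro)),
      pvRotate (pvRotate (pvFlipRight (pvFlipUp tetro))),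
      pvRotate (pvRotate (pvRotate (pvFlipRight (pvFlipUp tetro))))] := by
    simp only [all_tetroes, show PySem.List.pyRange 0 4 1 = [0,1,2,3] from by decide,
      show PySem.List.pyRange 0 0 1 = [] from by decide,
      show PySem.List.pyRange 0 1 1 = [0] from by decide,
      show PySem.List.pyRange 0 2 1 = [0,1] from by decide,
      show PySem.List.pyRange 0 3 1 = [0,1,2] from by decide,
      List.foldl_cons, List.foldl_nil, List.nil_append, List.cons_append, List.append_assoc]
  rw [hexp, hfru, hu, hfr]
  simp only [R1, R2, R3, R4, R5, R6, R7]
  show _ = all_tetroes_alt tetro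
  simp only [all_tetroes_alt]
  rw [List.map_reverse]
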